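-- pv_equiv track=rewrite | github.com/arin17bishwa/myCP_sols | SPOJ/TOANDFRO.py | func
-- ===== SOURCE A (Python) =====
-- def func(col: int, s: str):
--     n = len(s)
--     ans = [' ' * col] * (n // col)
--     p = 1
--     for i in range(n // col):
--         if p == 1:
--             ans[i] = s[i * col:(i + 1) * col:p]
--         else:
--             ans[i] = s[(i + 1) * col - 1:i * col - 1:p]
--         p *= -1
--     prob = [i[j] for j in range(col) for i in ans]
--     return ''.join(prob)
-- ===== SOURCE B (Python) =====
-- def func(col: int, s: str):
--     n = len(s)
--     rows = n // col
--     out = []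
--     for j in range(col):
--         for i in range(rows):
--             if i % 2 == 0:
--                 out.append(s[i * col + j])
--             else:
--                 out.append(s[i * col + col - 1 - j])
--     return ''.join(out)
-- ===== Notes on version B (the rewrite author's own statement) =====
-- stated objective: simpler
-- what changed: B drops A's materialized grid of (possibly reversed) row slices and the transpose comprehension, emitting each output character directly by index arithmetic s[i*col+j] / s[i*col+col-1-j] in one nested loop.
import Mathlib
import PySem

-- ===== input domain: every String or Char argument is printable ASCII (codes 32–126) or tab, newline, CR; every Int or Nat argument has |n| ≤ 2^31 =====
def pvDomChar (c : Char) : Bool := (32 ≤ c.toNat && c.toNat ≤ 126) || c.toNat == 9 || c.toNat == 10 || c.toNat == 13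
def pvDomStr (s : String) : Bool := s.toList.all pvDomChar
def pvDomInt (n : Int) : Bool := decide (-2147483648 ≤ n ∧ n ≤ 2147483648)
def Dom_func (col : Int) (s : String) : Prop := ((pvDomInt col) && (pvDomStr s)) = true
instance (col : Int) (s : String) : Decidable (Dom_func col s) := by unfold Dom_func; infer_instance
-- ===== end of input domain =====

-- B replaces A's grid of sliced/reversed rows + transpose comprehension by direct index arithmetic
-- into s; same output, genuinely different decomposition (objective: simpler).

-- ===== PORT A =====
-- in-range string indexing i[j] / s[..] is ported with pyGetD (exact wherever Python does not raise;
-- Python raises only at col = 0, excluded by Pre_)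
def func (col : Int) (s : String) : String :=
  let cs := s.toList
  let n : Int := cs.length
  let rows := PySem.Int.floordiv n col
  let ans0 : List (List Char) := List.replicate rows.toNat (List.replicate col.toNat ' ')
  let st := (PySem.List.pyRange 0 rows 1).foldl (fun (st : List (List Char) × Int) i =>
      let ans := st.1
      let p := st.2
      let row := if p == 1
        then (PySem.List.slice? cs (some (i * col)) (some ((i + 1) * col)) p).getD []
        else (PySem.List.slice? cs (some ((i + 1) * col - 1)) (some (i * col - 1)) p).getD []
      (ans.set i.toNat row, p * (-1))) (ans0, 1)
  let ans := st.1
  let prob := (PySem.List.pyRange 0 col 1).flatMap (fun j =>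
      ans.map (fun r => PySem.List.pyGetD r j ' '))
  String.mk prob

-- ===== PORT B =====
def func_alt (col : Int) (s : String) : String :=
  let cs := s.toList
  let n : Int := cs.length
  let rows := PySem.Int.floordiv n col
  String.mk ((PySem.List.pyRange 0 col 1).flatMap (fun j =>
    (PySem.List.pyRange 0 rows 1).map (fun i =>
      if PySem.Int.mod i 2 == 0 then PySem.List.pyGetD cs (i * col + j) ' '
      else PySem.List.pyGetD cs (i * col + col - 1 - j) ' ')))

-- ===== PRECONDITION & SPEC =====
-- Pre_ excludes exactly col = 0, where Python A raises ZeroDivisionError at n // col.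
def Pre_func (col : Int) (s : String) : Prop := col ≠ 0
instance (col : Int) (s : String) : Decidable (Pre_func col s) := by unfold Pre_func; infer_instance
def pvWitness_func : Int × String := (3, "abcdef")

def Spec_func (col : Int) (s : String) (out : String) : Prop := out = func_alt col s
instance (col : Int) (s : String) (out : String) : Decidable (Spec_func col s out) := by unfold Spec_func; infer_instance

-- ===== CLAIM (what is proved, stated in full; the proofs are below) =====
def Claim_equal_func : Prop := ∀ (col : Int) (s : String), Dom_func col s → Pre_func col s → Spec_func col s (func col s)

-- ===== LEMMAS AND PROOFS =====

lemma filterMap_eq_map_of_some {α β : Type} (f : α → Option β) (g : α → β) (l : List α)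
    (h : ∀ x ∈ l, f x = some (g x)) : l.filterMap f = l.map g := by
  induction l with
  | nil => rfl
  | cons x xs ih =>
    simp [h x (by simp), ih (fun y hy => h y (by simp [hy]))]

lemma slice_one_eq (cs : List Char) (a b : Int) (h0 : 0 ≤ a) (hab : a ≤ b)
    (hbl : b ≤ (cs.length : Int)) :
    PySem.List.slice? cs (some a) (some b) 1 =
      some ((List.range (b - a).toNat).map (fun (k : Nat) => PySem.List.pyGetD cs (a + (k : Int)) ' ')) := by
  unfold PySem.List.slice? PySem.List.sliceIndices
  have ha : ¬ (a < 0) := by omega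
  have hb : ¬ (b < 0) := by omega
  rw [if_neg (by norm_num : ¬ ((1:Int) = 0))]
  simp only [if_neg (by norm_num : ¬ ((1:Int) < 0)), if_neg ha, if_neg hb,
    min_eq_left hbl, min_eq_left (le_trans hab hbl),
    if_pos (by norm_num : (0:Int) < 1)]
  have hcount : (if a < b then ((b - a + 1 - 1) / 1).toNat else 0) = (b - a).toNat := by
    split_ifs with h <;> omega
  rw [hcount]
  congr 1
  apply filterMap_eq_map_of_some
  intro k hk
  simp only [List.mem_range] at hk
  have hnat : (a + 1 * (k : Int)).toNat = (a + (k : Int)).toNat := by omega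
  have hlt : (a + (k : Int)).toNat < cs.length := by omega
  rw [hnat, List.getElem?_eq_getElem hlt,
    PySem.List.pyGetD_eq_getElem cs ' ' (by omega) (by omega)]

lemma slice_neg_one_eq (cs : List Char) (a b : Int) (hb : 0 ≤ b) (hab : b < a)
    (hal : a < (cs.length : Int)) :
    PySem.List.slice? cs (some a) (some b) (-1) =
      some ((List.range (a - b).toNat).map (fun (k : Nat) => PySem.List.pyGetD cs (a - (k : Int)) ' ')) := by
  unfold PySem.List.slice? PySem.List.sliceIndices
  have ha : ¬ (a < 0) := by omega
  have hbn : ¬ (b < 0) := by omega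
  rw [if_neg (by norm_num : ¬ ((-1:Int) = 0))]
  simp only [if_pos (by norm_num : ((-1:Int) < 0)), if_neg ha, if_neg hbn,
    min_eq_left (show a ≤ (cs.length:Int) - 1 by omega),
    min_eq_left (show b ≤ (cs.length:Int) - 1 by omega),
    if_neg (by norm_num : ¬ ((0:Int) < -1))]
  have hcount : (if b < a then ((a - b + -(-1) - 1) / -(-1)).toNat else 0) = (a - b).toNat := by
    rw [if_pos hab]; norm_num
  rw [hcount]
  congr 1
  apply filterMap_eq_map_of_some
  intro k hk
  simp only [List.mem_range] at hk
  have hnat : (a + -1 * (k : Int)).toNat = (a - (k : Int)).toNat := by omega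
  have hlt : (a - (k : Int)).toNat < cs.length := by omega
  rw [hnat, List.getElem?_eq_getElem hlt,
    PySem.List.pyGetD_eq_getElem cs ' ' (by omega) (by omega)]

def stepA (cs : List Char) (col : Int) (st : List (List Char) × Int) (i : Int) :
    List (List Char) × Int :=
  (st.1.set i.toNat (if st.2 == 1
      then (PySem.List.slice? cs (some (i * col)) (some ((i + 1) * col)) st.2).getD []
      else (PySem.List.slice? cs (some ((i + 1) * col - 1)) (some (i * col - 1)) st.2).getD []),
   st.2 * (-1))

def rowF (cs : List Char) (col i : Int) : List Char :=
  if PySem.Int.mod i 2 == 0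
  then (PySem.List.slice? cs (some (i * col)) (some ((i + 1) * col)) 1).getD []
  else (PySem.List.slice? cs (some ((i + 1) * col - 1)) (some (i * col - 1)) (-1)).getD []

lemma foldA_inv (cs : List Char) (col : Int) (rows : Int) (hr : 0 ≤ rows)
    (m : Nat) (hm : (m : Int) ≤ rows) :
    (PySem.List.pyRange 0 (m : Int) 1).foldl (stepA cs col)
        (List.replicate rows.toNat (List.replicate col.toNat ' '), 1)
      = ((PySem.List.pyRange 0 (m : Int) 1).map (rowF cs col)
          ++ (List.replicate rows.toNat (List.replicate col.toNat ' ')).drop m,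
         if m % 2 = 0 then 1 else -1) := by
  induction m with
  | zero =>
    simp [PySem.List.pyRange_one_eq_nil (le_refl (0:Int))]
  | succ m ih =>
    have hm' : (m : Int) ≤ rows := by push_cast at hm ⊢; omega
    have hcast : ((m + 1 : Nat) : Int) = ((m : Nat) : Int) + 1 := by push_cast; ring
    rw [hcast, PySem.List.pyRange_one_succ_right (by exact_mod_cast Nat.cast_nonneg m),
      List.foldl_append, List.map_append, ih hm']
    simp only [List.foldl_cons, List.foldl_nil]
    have hlen : ((PySem.List.pyRange 0 (m : Int) 1).map (rowF cs col)).length = m := by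
      simp [PySem.List.length_pyRange_one]
    have hmlt : m < rows.toNat := by omega
    have hdrop : (List.replicate rows.toNat (List.replicate col.toNat ' ')).drop m
        = List.replicate col.toNat ' ' :: (List.replicate rows.toNat (List.replicate col.toNat ' ')).drop (m + 1) := by
      rw [List.drop_replicate, List.drop_replicate,
        show rows.toNat - m = (rows.toNat - (m+1)) + 1 by omega]
      rfl
    have hmod : (PySem.Int.mod (m : Int) 2 == 0) = (decide (m % 2 = 0)) := by
      rw [show ((2:Int) = ((2:Nat):Int)) by norm_num, PySem.Int.mod_natCast]
      by_cases h : m % 2 = 0 <;> simp [h] <;> omega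
    unfold stepA
    refine Prod.ext ?_ ?_
    · -- list component
      simp only [hdrop]
      rw [List.set_append_right _ _ (by omega)]
      rw [hlen]
      simp only [Int.toNat_natCast, Nat.sub_self]
      simp only [List.set_cons_zero, List.append_assoc, List.singleton_append]
      congr 2
      unfold rowF
      by_cases hpar : m % 2 = 0
      · have h2 : ((m:Int)) % 2 = 0 := by omega
        simp [hmod, hpar, h2]
      · have h2 : ((m:Int)) % 2 = 1 := by omega
        simp [hmod, hpar, h2]
    · by_cases hpar : m % 2 = 0
      · simp [hpar, show (m + 1) % 2 ≠ 0 by omega]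
      · simp [hpar, show (m + 1) % 2 = 0 by omega]


lemma rowF_get (cs : List Char) (col rows i j : Int) (hcol : 0 < col)
    (hi0 : 0 ≤ i) (hir : i < rows) (hj0 : 0 ≤ j) (hjc : j < col)
    (hrn : rows * col ≤ (cs.length : Int)) :
    PySem.List.pyGetD (rowF cs col i) j ' '
      = (if PySem.Int.mod i 2 == 0 then PySem.List.pyGetD cs (i * col + j) ' '
         else PySem.List.pyGetD cs (i * col + col - 1 - j) ' ') := by
  have hic : 0 ≤ i * col := mul_nonneg hi0 (le_of_lt hcol)
  have h1 : (i + 1) * col ≤ rows * col :=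
    mul_le_mul_of_nonneg_right (by omega) (le_of_lt hcol)
  have hmod : PySem.Int.mod i 2 = i % 2 := PySem.Int.mod_eq_emod_of_pos (by norm_num)
  have hexp : (i + 1) * col = i * col + col := by ring
  unfold rowF
  by_cases hpar : i % 2 = 0
  · rw [if_pos (by simp [hmod, hpar]), if_pos (by simp [hmod, hpar])]
    rw [slice_one_eq cs (i * col) ((i + 1) * col) hic (by omega) (by omega)]
    simp only [Option.getD_some, show (i + 1) * col - i * col = col by ring]
    rw [PySem.List.pyGetD_eq_getElem _ ' ' hj0 (by simp; omega)]
    simp only [List.getElem_map, List.getElem_range]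
    rw [show ((j.toNat : Int)) = j by omega]
  · rw [if_neg (by simp [hmod, hpar]), if_neg (by simp [hmod, hpar])]
    have hi1 : 1 ≤ i := by omega
    have hb0 : 0 ≤ i * col - 1 := by nlinarith
    rw [slice_neg_one_eq cs ((i + 1) * col - 1) (i * col - 1) hb0 (by omega) (by omega)]
    simp only [Option.getD_some, show (i + 1) * col - 1 - (i * col - 1) = col by ring]
    rw [PySem.List.pyGetD_eq_getElem _ ' ' hj0 (by simp; omega)]
    simp only [List.getElem_map, List.getElem_range]
    rw [show ((j.toNat : Int)) = j by omega]
    congr 1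
    ring

-- ===== VERDICT (by name: the statement is the Claim_ definition above) =====
theorem func_spec : Claim_equal_func := by
  intro col s _hdom hcol
  unfold Spec_func
  show (let cs := s.toList
        let n : Int := cs.length
        let rows := PySem.Int.floordiv n col
        let ans0 : List (List Char) := List.replicate rows.toNat (List.replicate col.toNat ' ')
        let st := (PySem.List.pyRange 0 rows 1).foldl (stepA cs col) (ans0, 1)
        let ans := st.1
        let prob := (PySem.List.pyRange 0 col 1).flatMap (fun j =>
            ans.map (fun r => PySem.List.pyGetD r j ' '))
        String.mk prob) = func_alt col s
  unfold func_alt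
  simp only []
  set cs := s.toList with hcs
  set n : Int := (cs.length : Int) with hn
  set rows := PySem.Int.floordiv n col with hrows
  rcases lt_trichotomy col 0 with hneg | hzero | hpos
  · rw [PySem.List.pyRange_one_eq_nil (show col ≤ 0 by omega)]
    simp
  · exact absurd hzero hcol
  · have hn0 : 0 ≤ n := by positivity
    have hrpos : 0 ≤ rows := by
      rw [hrows, PySem.Int.floordiv_eq_ediv_of_pos hpos]
      exact Int.ediv_nonneg hn0 (le_of_lt hpos)
    have hrn : rows * col ≤ n := by
      rw [hrows, PySem.Int.floordiv_eq_ediv_of_pos hpos]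
      exact Int.ediv_mul_le n (by omega)
    have hfold := foldA_inv cs col rows hrpos rows.toNat (by omega)
    rw [show ((rows.toNat : Int)) = rows by omega] at hfold
    rw [hfold]
    simp only [List.drop_replicate, Nat.sub_self, List.replicate_zero, List.append_nil]
    congr 1
    apply List.flatMap_congr
    intro j hj
    rw [PySem.List.mem_pyRange_one] at hj
    rw [List.map_map]
    apply List.map_congr_left
    intro i hi
    rw [PySem.List.mem_pyRange_one] at hi
    exact rowF_get cs col rows i j hpos hi.1 hi.2 hj.1 hj.2 hrn
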